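-- pv_equiv track=rewrite | github.com/haozhigh/model_gpu_cache | script/analyze.py | get_sorted_distances
-- ===== SOURCE A (Python) =====
-- def get_sorted_distances(distance_records):
--     ##  Variable declare
--     distances = set()
--
--     ##  Iterate over each record
--     for record in distance_records:
--         distance = record[1]
--         distances.add(distance)
--
--     ##  Convert distances from set to list and sort itself
--     distances_list = list(distances)
--     distances_list.sort()
--
--     ##  Return the sorted distances
--     return distances_list
-- ===== SOURCE B (Python) =====
-- def get_sorted_distances(distance_records):
--     # sort all second components, then one pass dropping adjacent duplicates
--     values = sorted(record[1] for record in distance_records)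
--     result = []
--     prev = None
--     for v in values:
--         if not result or v != prev:
--             result.append(v)
--             prev = v
--     return result
-- ===== Notes on version B (the rewrite author's own statement) =====
-- stated objective: alternative
-- what changed: Replaces the set accumulation (hash set, then list+sort) by sort-then-adjacent-dedup: sort all second components with duplicates and emit each value once in a single linear scan tracking only the previous emitted value.
import Mathlib
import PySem

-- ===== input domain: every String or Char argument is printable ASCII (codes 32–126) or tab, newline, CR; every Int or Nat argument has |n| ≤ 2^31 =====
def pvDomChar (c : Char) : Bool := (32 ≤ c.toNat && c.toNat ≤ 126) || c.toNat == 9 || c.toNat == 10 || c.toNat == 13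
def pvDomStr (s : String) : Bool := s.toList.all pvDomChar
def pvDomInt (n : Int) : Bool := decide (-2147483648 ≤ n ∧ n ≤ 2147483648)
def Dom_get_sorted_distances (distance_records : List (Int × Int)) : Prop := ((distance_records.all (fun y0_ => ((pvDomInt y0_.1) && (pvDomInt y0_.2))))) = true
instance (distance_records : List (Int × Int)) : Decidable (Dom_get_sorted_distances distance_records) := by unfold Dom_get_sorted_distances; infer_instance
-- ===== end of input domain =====

-- B replaces A's hash-set accumulation by sort-then-adjacent-dedup (alternative decomposition, same cost).

-- ===== PORT A =====
def get_sorted_distances (distance_records : List (Int × Int)) : List Int :=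
  -- distances = set(); for record in distance_records: distances.add(record[1])
  let distances : PySem.Set Int :=
    distance_records.foldl (fun s record => PySem.Set.add s record.2) PySem.Set.empty
  -- distances_list = list(distances); distances_list.sort()
  PySem.List.sorted distances (fun x => x) false

-- ===== PORT B =====
-- the scan 'if not result or v != prev: result.append(v); prev = v' over the tail
def pvDedupAdj (prev : Int) : List Int → List Int
  | [] => []
  | v :: vs => if v = prev then pvDedupAdj prev vs else v :: pvDedupAdj v vs

def get_sorted_distances_alt (distance_records : List (Int × Int)) : List Int :=
  let values := PySem.List.sorted (distance_records.map (fun record => record.2)) (fun x => x) false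
  match values with
  | [] => []
  | v :: vs => v :: pvDedupAdj v vs

-- ===== PRECONDITION & SPEC =====
def Spec_get_sorted_distances (distance_records : List (Int × Int)) (out : List Int) : Prop := out = get_sorted_distances_alt distance_records
instance (distance_records : List (Int × Int)) (out : List Int) : Decidable (Spec_get_sorted_distances distance_records out) := by unfold Spec_get_sorted_distances; infer_instance

-- ===== CLAIM (what is proved, stated in full; the proofs are below) =====
def Claim_equal_get_sorted_distances : Prop := ∀ (distance_records : List (Int × Int)), Dom_get_sorted_distances distance_records → Spec_get_sorted_distances distance_records (get_sorted_distances distance_records)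

-- ===== LEMMAS AND PROOFS =====

theorem mem_pvDedupAdj (x prev : Int) (l : List Int)
    (hp : l.Pairwise (· ≤ ·)) (hle : ∀ y ∈ l, prev ≤ y) :
    x ∈ pvDedupAdj prev l ↔ x ∈ l ∧ x ≠ prev := by
  induction l generalizing prev with
  | nil => simp [pvDedupAdj]
  | cons v vs ih =>
    rw [List.pairwise_cons] at hp
    by_cases hv : v = prev
    · subst hv
      rw [pvDedupAdj, if_pos rfl, ih v hp.2 hp.1]
      simp only [List.mem_cons]
      tauto
    · rw [pvDedupAdj, if_neg hv]
      have hlt : prev < v := lt_of_le_of_ne (hle v (List.mem_cons_self ..)) (fun h => hv h.symm)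
      simp only [List.mem_cons, ih v hp.2 hp.1]
      constructor
      · rintro (rfl | ⟨hm, hne⟩)
        · exact ⟨Or.inl rfl, by omega⟩
        · exact ⟨Or.inr hm, by have := hp.1 x hm; omega⟩
      · rintro ⟨rfl | hm, hne⟩
        · exact Or.inl rfl
        · by_cases hxv : x = v
          · exact Or.inl hxv
          · exact Or.inr ⟨hm, hxv⟩

theorem pairwise_pvDedupAdj (prev : Int) (l : List Int)
    (hp : l.Pairwise (· ≤ ·)) (hle : ∀ y ∈ l, prev ≤ y) :
    (pvDedupAdj prev l).Pairwise (· < ·) := by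
  induction l generalizing prev with
  | nil => simp [pvDedupAdj]
  | cons v vs ih =>
    rw [List.pairwise_cons] at hp
    by_cases hv : v = prev
    · subst hv; rw [pvDedupAdj, if_pos rfl]; exact ih v hp.2 hp.1
    · rw [pvDedupAdj, if_neg hv, List.pairwise_cons]
      refine ⟨?_, ih v hp.2 hp.1⟩
      intro z hz
      rw [mem_pvDedupAdj z v vs hp.2 hp.1] at hz
      exact lt_of_le_of_ne (hp.1 z hz.1) (fun h => hz.2 h.symm)

theorem mem_setFoldl (y : Int) (rs : List (Int × Int)) :
    y ∈ rs.foldl (fun s record => PySem.Set.add s record.2) PySem.Set.empty ↔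
      ∃ b ∈ rs, y = b.2 := by
  rw [PySem.Set.mem_foldl_add]
  simp [PySem.Set.empty]

theorem nodup_setFoldl (rs : List (Int × Int)) (s : PySem.Set Int) (hs : s.Nodup) :
    (rs.foldl (fun s record => PySem.Set.add s record.2) s).Nodup := by
  induction rs generalizing s with
  | nil => exact hs
  | cons r rs ih => exact ih (PySem.Set.add s r.2) (PySem.Set.nodup_add s r.2 hs)

-- ===== VERDICT (by name: the statement is the Claim_ definition above) =====
theorem get_sorted_distances_spec : Claim_equal_get_sorted_distances := by
  intro rs _
  unfold Spec_get_sorted_distances get_sorted_distances get_sorted_distances_alt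
  have hpw : (PySem.List.sorted (rs.map (fun record => record.2)) (fun x => x) false).Pairwise (· ≤ ·) := by
    simpa using PySem.List.sorted_pairwise (xs := rs.map (fun record => record.2)) (key := fun x => x)
  show PySem.List.sorted (rs.foldl (fun s record => PySem.Set.add s record.2) PySem.Set.empty)
      (fun x => x) false =
    (match PySem.List.sorted (rs.map (fun record => record.2)) (fun x => x) false with
      | [] => ([] : List Int)
      | v :: vs => v :: pvDedupAdj v vs)
  cases hc : PySem.List.sorted (rs.map (fun record => record.2)) (fun x => x) false with
  | nil =>
    have : rs.map (fun record => record.2) = [] := by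
      rwa [PySem.List.sorted_eq_nil_iff] at hc
    have hrs : rs = [] := by simpa using this
    subst hrs
    rfl
  | cons v vs =>
    rw [hc] at hpw
    rw [List.pairwise_cons] at hpw
    have hltB : (v :: pvDedupAdj v vs).Pairwise (· < ·) := by
      rw [List.pairwise_cons]
      refine ⟨?_, pairwise_pvDedupAdj v vs hpw.2 hpw.1⟩
      intro z hz
      rw [mem_pvDedupAdj z v vs hpw.2 hpw.1] at hz
      exact lt_of_le_of_ne (hpw.1 z hz.1) (fun h => hz.2 h.symm)
    have hmemB : ∀ x, x ∈ v :: pvDedupAdj v vs ↔ x ∈ v :: vs := by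
      intro x
      simp only [List.mem_cons, mem_pvDedupAdj x v vs hpw.2 hpw.1]
      by_cases hxv : x = v <;> simp [hxv]
    have hperm : (v :: pvDedupAdj v vs).Perm
        (rs.foldl (fun s record => PySem.Set.add s record.2) PySem.Set.empty) := by
      rw [List.perm_ext_iff_of_nodup (hltB.imp ne_of_lt) (nodup_setFoldl rs PySem.Set.empty (by simp [PySem.Set.empty]))]
      intro a
      rw [hmemB a, ← hc, PySem.List.mem_sorted, mem_setFoldl a rs]
      simp
    exact PySem.List.sorted_eq_of_perm_of_pairwise_lt _ _ (fun x => x) hperm hltB
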